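-- pv_equiv track=rewrite | github.com/neilwj7/advent-of-code-2025 | 8/main.py | get_group_ids
-- ===== SOURCE A (Python) =====
-- def get_group_ids(groups, b1, b2):
--     g1, g2 = -1, -1
--     for i, group in enumerate(groups):
--         if b1 in group:
--             g1 = i
--         if b2 in group:
--             g2 = i
--     return g1, g2
-- ===== SOURCE B (Python) =====
-- def get_group_ids(groups, b1, b2):
--     def last_idx(b):
--         for i in reversed(range(len(groups))):
--             if b in groups[i]:
--                 return i
--         return -1
--     return last_idx(b1), last_idx(b2)
-- ===== Notes on version B (the rewrite author's own statement) =====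
-- stated objective: alternative
-- what changed: Replaces the single forward pass with a two-variable accumulator by two independent reverse searches that early-exit at the first (i.e. last) group containing each element.
import Mathlib
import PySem

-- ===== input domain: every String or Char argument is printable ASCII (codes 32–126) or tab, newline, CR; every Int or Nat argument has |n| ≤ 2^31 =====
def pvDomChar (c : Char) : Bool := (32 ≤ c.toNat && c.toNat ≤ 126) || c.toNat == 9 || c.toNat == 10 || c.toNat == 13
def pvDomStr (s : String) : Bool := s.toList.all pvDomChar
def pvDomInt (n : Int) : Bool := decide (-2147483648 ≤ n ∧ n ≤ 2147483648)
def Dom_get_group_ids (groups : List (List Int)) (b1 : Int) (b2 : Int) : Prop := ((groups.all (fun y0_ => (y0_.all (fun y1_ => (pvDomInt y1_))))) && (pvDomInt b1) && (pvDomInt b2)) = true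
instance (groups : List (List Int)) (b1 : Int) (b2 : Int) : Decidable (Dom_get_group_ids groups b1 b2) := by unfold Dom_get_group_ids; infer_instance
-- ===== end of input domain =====

-- B replaces A's single forward pass with a mutable pair by two independent reverse
-- searches, each stopping at the first (hence last) group containing its element
-- (objective: alternative decomposition; same cost).

-- ===== PORT A =====
-- A: forward loop over enumerate(groups) updating g1, g2; ported as a foldl
-- carrying the counter i and the two accumulators.
def get_group_ids (groups : List (List Int)) (b1 : Int) (b2 : Int) : Int × Int :=
  let st := groups.foldl
    (fun (st : Int × Int × Int) group =>
      (st.1 + 1,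
       (if group.contains b1 then st.1 else st.2.1),
       (if group.contains b2 then st.1 else st.2.2)))
    (0, -1, -1)
  (st.2.1, st.2.2)

-- ===== PORT B =====
-- B's last_idx: reverse search — later groups are examined first (the recursion
-- consults the tail before the head), first hit from the end wins, -1 if none.
def pvLastIdx (groups : List (List Int)) (b : Int) : Int :=
  match groups with
  | [] => -1
  | g :: t =>
    let r := pvLastIdx t b
    if 0 ≤ r then r + 1 else if g.contains b then 0 else -1

def get_group_ids_alt (groups : List (List Int)) (b1 : Int) (b2 : Int) : Int × Int :=
  (pvLastIdx groups b1, pvLastIdx groups b2)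

-- ===== PRECONDITION & SPEC =====
def Spec_get_group_ids (groups : List (List Int)) (b1 : Int) (b2 : Int) (out : Int × Int) : Prop := out = get_group_ids_alt groups b1 b2
instance (groups : List (List Int)) (b1 : Int) (b2 : Int) (out : Int × Int) : Decidable (Spec_get_group_ids groups b1 b2 out) := by unfold Spec_get_group_ids; infer_instance

-- ===== CLAIM (what is proved, stated in full; the proofs are below) =====
def Claim_equal_get_group_ids : Prop := ∀ (groups : List (List Int)) (b1 : Int) (b2 : Int), Dom_get_group_ids groups b1 b2 → Spec_get_group_ids groups b1 b2 (get_group_ids groups b1 b2)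

-- ===== LEMMAS AND PROOFS =====
lemma pvLastIdx_lb (groups : List (List Int)) (b : Int) : -1 ≤ pvLastIdx groups b := by
  induction groups with
  | nil => simp [pvLastIdx]
  | cons g t ih => simp only [pvLastIdx]; split_ifs <;> omega

lemma foldA_eq (b1 b2 : Int) (groups : List (List Int)) : ∀ (i g1 g2 : Int),
    groups.foldl
      (fun (st : Int × Int × Int) group =>
        (st.1 + 1,
         (if group.contains b1 then st.1 else st.2.1),
         (if group.contains b2 then st.1 else st.2.2)))
      (i, g1, g2)
    = (i + groups.length,
       (if 0 ≤ pvLastIdx groups b1 then i + pvLastIdx groups b1 else g1),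
       (if 0 ≤ pvLastIdx groups b2 then i + pvLastIdx groups b2 else g2)) := by
  induction groups with
  | nil => intro i g1 g2; simp [pvLastIdx]
  | cons g t ih =>
    intro i g1 g2
    have h1 := pvLastIdx_lb t b1
    have h2 := pvLastIdx_lb t b2
    simp only [List.foldl_cons, ih, pvLastIdx, List.length_cons]
    refine Prod.ext (by push_cast; ring) (Prod.ext ?_ ?_) <;> simp only <;>
      split_ifs <;> omega

-- ===== VERDICT (by name: the statement is the Claim_ definition above) =====
theorem get_group_ids_spec : Claim_equal_get_group_ids := by
  intro groups b1 b2 _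
  unfold Spec_get_group_ids get_group_ids get_group_ids_alt
  have h1 := pvLastIdx_lb groups b1
  have h2 := pvLastIdx_lb groups b2
  simp only [foldA_eq]
  refine Prod.ext ?_ ?_ <;> simp only <;> split_ifs <;> omega
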